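-- pv_equiv track=rewrite | github.com/SHM-white/25UniversityCompetition-C | problem4_sleep_analysis.py | calculate_awakenings
-- ===== SOURCE A (Python) =====
-- from typing import List, Dict, Tuple, Optional
--
-- def calculate_awakenings(sleep_stages: List[int]) -> int:
--     """
--     计算夜间醒来次数
--
--     Parameters:
--     sleep_stages: 睡眠阶段序列
--
--     Returns:
--     醒来次数
--     """
--     if len(sleep_stages) < 2:
--         return 0
--
--     # 找到入睡时间点
--     sol_epoch = None
--     for i, stage in enumerate(sleep_stages):
--         if stage in [2, 3, 5]:
--             sol_epoch = i
--             break
--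
--     if sol_epoch is None:
--         return 0
--
--     awakenings = 0
--     for i in range(sol_epoch, len(sleep_stages) - 1):
--         if sleep_stages[i] in [2, 3, 5] and sleep_stages[i + 1] == 4:
--             awakenings += 1
--
--     return awakenings
-- ===== SOURCE B (Python) =====
-- def calculate_awakenings(sleep_stages):
--     # Stage 1: run-length collapse -- keep one representative per maximal run
--     # of equal consecutive stages (lengths are irrelevant for transitions).
--     runs = []
--     for s in sleep_stages:
--         if not runs or runs[-1] != s:
--             runs.append(s)
--     # Stage 2: a sleep->wake transition is exactly a run boundary
--     # (prev run value in {2,3,5}, next run value 4); within-run pairs (x,x)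
--     # can never satisfy the guard since 4 is not in {2,3,5}.
--     count = 0
--     for prev, cur in zip(runs, runs[1:]):
--         if prev in (2, 3, 5) and cur == 4:
--             count += 1
--     return count
-- ===== Notes on version B (the rewrite author's own statement) =====
-- stated objective: alternative
-- what changed: Instead of finding sleep onset and scanning raw epochs, B run-length-collapses the stage sequence into one value per maximal run and then counts run boundaries {2,3,5}->4; correct because within-run pairs (x,x) never fire the guard (4 not in {2,3,5}) and no stage in {2,3,5} precedes the first one, making A's onset pass redundant.
import Mathlib
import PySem

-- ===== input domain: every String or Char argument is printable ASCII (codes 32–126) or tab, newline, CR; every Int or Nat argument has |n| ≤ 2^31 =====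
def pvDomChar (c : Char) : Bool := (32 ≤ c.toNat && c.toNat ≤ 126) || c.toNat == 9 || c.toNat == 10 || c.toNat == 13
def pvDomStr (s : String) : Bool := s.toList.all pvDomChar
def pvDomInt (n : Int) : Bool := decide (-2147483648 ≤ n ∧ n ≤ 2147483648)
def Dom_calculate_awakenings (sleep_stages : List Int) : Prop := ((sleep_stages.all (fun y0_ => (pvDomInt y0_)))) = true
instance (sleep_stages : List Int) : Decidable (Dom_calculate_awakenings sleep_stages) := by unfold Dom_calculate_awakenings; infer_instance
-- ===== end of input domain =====

-- B replaces A's onset-search-then-scan with run-length collapse followed by counting run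
-- boundaries {2,3,5}->4 (alternative decomposition; same asymptotics).

-- ===== PORT A =====
-- first pass of A: index of the first stage in [2,3,5], walking with enumerate's counter
def pvFindSol : List Int → Int → Option Int
  | [], _ => none
  | a :: rest, i => if ([2, 3, 5] : List Int).contains a then some i else pvFindSol rest (i + 1)

-- second pass of A: 'for i in range(sol, len-1)', written as recursion on the loop index
def pvCountFrom (xs : List Int) (i : Int) : Int :=
  if h : i < (xs.length : Int) - 1 then
    (if ([2, 3, 5] : List Int).contains ((PySem.List.pyGet? xs i).getD 0)
        && ((PySem.List.pyGet? xs (i + 1)).getD 0 == 4)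
     then 1 else 0) + pvCountFrom xs (i + 1)
  else 0
termination_by ((xs.length : Int) - 1 - i).toNat
decreasing_by omega

def calculate_awakenings (sleep_stages : List Int) : Int :=
  if sleep_stages.length < 2 then 0
  else
    match pvFindSol sleep_stages 0 with
    | none => 0
    | some sol => pvCountFrom sleep_stages sol

-- ===== PORT B =====
-- stage 1 of B: run-length collapse ('if not runs or runs[-1] != s: runs.append(s)')
def pvRuns (xs : List Int) : List Int :=
  xs.foldl (fun runs s => if runs.getLast? ≠ some s then runs ++ [s] else runs) []

-- stage 2 of B: count adjacent run pairs (prev in {2,3,5}, cur == 4)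
def pvCountPairs : List Int → Int
  | a :: b :: rest =>
      (if ([2, 3, 5] : List Int).contains a && (b == 4) then 1 else 0)
        + pvCountPairs (b :: rest)
  | _ => 0

def calculate_awakenings_alt (sleep_stages : List Int) : Int :=
  pvCountPairs (pvRuns sleep_stages)

-- ===== PRECONDITION & SPEC =====
def Spec_calculate_awakenings (sleep_stages : List Int) (out : Int) : Prop := out = calculate_awakenings_alt sleep_stages
instance (sleep_stages : List Int) (out : Int) : Decidable (Spec_calculate_awakenings sleep_stages out) := by unfold Spec_calculate_awakenings; infer_instance

-- ===== CLAIM (what is proved, stated in full; the proofs are below) =====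
def Claim_equal_calculate_awakenings : Prop := ∀ (sleep_stages : List Int), Dom_calculate_awakenings sleep_stages → Spec_calculate_awakenings sleep_stages (calculate_awakenings sleep_stages)

-- ===== LEMMAS AND PROOFS =====

-- proof-side helper: structural form of the run collapse, seeded with the current last run value
def pvColl (last : Int) : List Int → List Int
  | [] => [last]
  | s :: t => if s = last then pvColl last t else last :: pvColl s t

theorem count_short (l : List Int) (h : l.length ≤ 1) : pvCountPairs l = 0 := by
  match l, h with
  | [], _ => rfl
  | [_], _ => rfl

theorem count_cons_not_mem (a : Int) (rest : List Int)
    (h : ¬(a = 2 ∨ a = 3 ∨ a = 5)) :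
    pvCountPairs (a :: rest) = pvCountPairs rest := by
  cases rest with
  | nil => rfl
  | cons b t =>
      simp only [pvCountPairs]
      rw [if_neg (by simp [h])]
      ring

theorem countFrom_eq_count_drop (xs : List Int) (i : Int) (h0 : 0 ≤ i) :
    pvCountFrom xs i = pvCountPairs (xs.drop i.toNat) := by
  generalize hn : ((xs.length : Int) - 1 - i).toNat = n
  induction n generalizing i with
  | zero =>
      rw [pvCountFrom]
      rw [dif_neg (by omega)]
      exact (count_short _ (by simp; omega)).symm
  | succ n ih =>
      rw [pvCountFrom]
      rw [dif_pos (by omega)]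
      have hi1 : i.toNat < xs.length := by omega
      have hi2 : i.toNat + 1 < xs.length := by omega
      have hd1 : xs.drop i.toNat = xs[i.toNat] :: xs.drop (i.toNat + 1) :=
        List.drop_eq_getElem_cons hi1
      have hd2 : xs.drop (i.toNat + 1) = xs[i.toNat + 1] :: xs.drop (i.toNat + 2) :=
        List.drop_eq_getElem_cons hi2
      have hg1 : PySem.List.pyGet? xs i = some xs[i.toNat] := by
        rw [PySem.List.pyGet?_of_nonneg xs h0]
        exact List.getElem?_eq_getElem hi1
      have hg2 : PySem.List.pyGet? xs (i + 1) = some xs[i.toNat + 1] := by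
        rw [PySem.List.pyGet?_of_nonneg xs (by omega : (0:Int) ≤ i + 1)]
        have ht : (i + 1).toNat = i.toNat + 1 := by omega
        rw [ht]
        exact List.getElem?_eq_getElem hi2
      rw [ih (i + 1) (by omega) (by omega)]
      have : (i + 1).toNat = i.toNat + 1 := by omega
      rw [this, hd1, hd2, hg1, hg2]
      simp [pvCountPairs, ← hd2]

theorem findSol_none_count (xs : List Int) (i : Int) (h : pvFindSol xs i = none) :
    pvCountPairs xs = 0 := by
  induction xs generalizing i with
  | nil => rfl
  | cons a rest ih =>
      rw [pvFindSol] at h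
      by_cases hc : a = 2 ∨ a = 3 ∨ a = 5
      · rw [if_pos (by simp [hc])] at h
        exact absurd h (by simp)
      · rw [if_neg (by simp [hc])] at h
        rw [count_cons_not_mem a rest hc]
        exact ih (i + 1) h

theorem findSol_some (xs : List Int) (i j : Int) (h : pvFindSol xs i = some j) :
    i ≤ j ∧ pvCountPairs xs = pvCountPairs (xs.drop (j - i).toNat) := by
  induction xs generalizing i with
  | nil => simp [pvFindSol] at h
  | cons a rest ih =>
      rw [pvFindSol] at h
      by_cases hc : a = 2 ∨ a = 3 ∨ a = 5
      · rw [if_pos (by simp [hc])] at h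
        obtain rfl : i = j := by injection h
        simp
      · rw [if_neg (by simp [hc])] at h
        obtain ⟨hle, heq⟩ := ih (i + 1) h
        refine ⟨by omega, ?_⟩
        have hk : (j - i).toNat = (j - (i + 1)).toNat + 1 := by omega
        rw [count_cons_not_mem a rest hc, heq, hk]
        rfl

-- A (paired with the lemmas above) equals the plain adjacent-pair count on the raw list
theorem a_eq_countPairs (xs : List Int) : calculate_awakenings xs = pvCountPairs xs := by
  unfold calculate_awakenings
  split
  · exact (count_short xs (by omega)).symm
  · cases hf : pvFindSol xs 0 with
    | none => exact (findSol_none_count xs 0 hf).symm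
    | some sol =>
        show pvCountFrom xs sol = pvCountPairs xs
        obtain ⟨hle, heq⟩ := findSol_some xs 0 sol hf
        rw [countFrom_eq_count_drop xs sol hle, heq]
        norm_num

-- the foldl run-collapse equals the structural one
theorem foldl_coll (xs : List Int) (acc : List Int) (last : Int) :
    xs.foldl (fun runs s => if runs.getLast? ≠ some s then runs ++ [s] else runs) (acc ++ [last])
      = acc ++ pvColl last xs := by
  induction xs generalizing acc last with
  | nil => rfl
  | cons s t ih =>
      simp only [List.foldl_cons]
      by_cases hs : s = last
      · subst hs
        rw [if_neg (by simp)]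
        rw [ih acc s]
        simp [pvColl]
      · rw [if_pos (by simp [List.getLast?_append]; exact fun hh => hs hh.symm)]
        rw [ih (acc ++ [last]) s]
        simp [pvColl, hs]

theorem pvRuns_cons (x : Int) (t : List Int) : pvRuns (x :: t) = pvColl x t := by
  have h := foldl_coll t [] x
  simp only [List.nil_append] at h
  unfold pvRuns
  rw [List.foldl_cons]
  exact h

-- pvColl always starts with its seed
theorem coll_head (last : Int) (xs : List Int) : ∃ r, pvColl last xs = last :: r := by
  induction xs generalizing last with
  | nil => exact ⟨[], rfl⟩
  | cons s t ih =>
      by_cases hs : s = last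
      · simpa [pvColl, hs] using ih last
      · exact ⟨pvColl s t, by simp [pvColl, hs]⟩

-- collapsing runs does not change the pair count (within-run pairs never fire the guard)
theorem count_coll (x : Int) (t : List Int) :
    pvCountPairs (x :: t) = pvCountPairs (pvColl x t) := by
  induction t generalizing x with
  | nil => rfl
  | cons s t' ih =>
      by_cases hs : s = x
      · subst hs
        have hz : pvCountPairs (s :: s :: t') = pvCountPairs (s :: t') := by
          simp only [pvCountPairs]
          rw [if_neg (by simp; intro h; omega)]
          ring
        rw [hz, ih s]
        simp [pvColl]
      · obtain ⟨r, hr⟩ := coll_head s t'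
        have h1 : pvColl x (s :: t') = x :: pvColl s t' := by simp [pvColl, hs]
        rw [h1, hr]
        simp only [pvCountPairs]
        rw [← hr, ← ih s]

-- ===== VERDICT (by name: the statement is the Claim_ definition above) =====
theorem calculate_awakenings_spec : Claim_equal_calculate_awakenings := by
  intro xs _
  unfold Spec_calculate_awakenings calculate_awakenings_alt
  rw [a_eq_countPairs]
  cases xs with
  | nil => rfl
  | cons x t => rw [pvRuns_cons, count_coll]
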